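-- pv_equiv track=rewrite | github.com/tarush10000/ProDev.AI | main.py | format_text_data
-- ===== SOURCE A (Python) =====
-- def format_text_data(input_text):
--     lines = input_text.split('\n')
--     formatted_entries = []
--     current_entry = []
--
--     for line in lines:
--         if line.strip():
--             if line[0].isdigit():
--                 if current_entry:
--                     formatted_entries.append(' '.join(current_entry))
--                     current_entry = []
--                 current_entry.append(line[1:].strip())
--             else:
--                 current_entry.append(line.strip())
--     if current_entry:
--         formatted_entries.append(' '.join(current_entry))
--
--     return formatted_entries
-- ===== SOURCE B (Python) =====
-- def format_text_data(input_text):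
--     # Two-phase: keep only non-blank lines, then recursively split them into runs
--     # (a run = one line plus the following lines that do not start with a digit)
--     # and join each run's cleaned contents.
--     lines = [l for l in input_text.split('\n') if l.strip()]
--
--     def content(l):
--         return l[1:].strip() if l[0].isdigit() else l.strip()
--
--     def rec(ls):
--         if not ls:
--             return []
--         run = [ls[0]]
--         rest = ls[1:]
--         while rest and not rest[0][0].isdigit():
--             run.append(rest[0])
--             rest = rest[1:]
--         return [' '.join(content(l) for l in run)] + rec(rest)
--
--     return rec(lines)
-- ===== Notes on version B (the rewrite author's own statement) =====
-- stated objective: alternative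
-- what changed: Replaces A's accumulate-into-current_entry-and-flush loop by a two-phase pipeline: filter out blank lines first, then recursively split the remaining lines into runs delimited by digit-leading lines and join each run.
import Mathlib
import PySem

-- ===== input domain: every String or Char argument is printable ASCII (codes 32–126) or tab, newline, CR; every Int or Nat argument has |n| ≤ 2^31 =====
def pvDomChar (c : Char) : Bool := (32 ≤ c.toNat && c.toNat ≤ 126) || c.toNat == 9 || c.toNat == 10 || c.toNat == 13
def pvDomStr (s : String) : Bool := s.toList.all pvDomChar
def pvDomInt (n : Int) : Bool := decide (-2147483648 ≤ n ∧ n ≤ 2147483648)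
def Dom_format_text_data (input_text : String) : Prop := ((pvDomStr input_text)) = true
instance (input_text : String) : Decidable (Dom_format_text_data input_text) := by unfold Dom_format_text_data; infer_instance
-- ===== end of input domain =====

-- B replaces A's accumulate-and-flush loop by a filter-then-recursive-run-splitting
-- decomposition (objective: alternative; same cost).

-- ===== PORT A =====
-- one iteration of A's for-loop over (formatted_entries, current_entry)
def pvStepA (st : List String × List String) (line : String) : List String × List String :=
  if PySem.Str.strip line ≠ "" then
    match PySem.Str.pyGet? line 0 with
    | some c =>
      if PySem.Chars.isdigit c then
        ((if st.2 ≠ [] then st.1 ++ [PySem.Str.join " " st.2] else st.1),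
         [PySem.Str.strip (PySem.Str.slice line (some 1) none)])
      else (st.1, st.2 ++ [PySem.Str.strip line])
    | none => st  -- unreachable: strip line ≠ "" implies line is nonempty
  else st

def format_text_data (input_text : String) : List String :=
  let lines := (PySem.Str.split? input_text "\n").getD []  -- sep "\n" ≠ "", so split? is `some`
  let st := lines.foldl pvStepA ([], [])
  if st.2 ≠ [] then st.1 ++ [PySem.Str.join " " st.2] else st.1

-- ===== PORT B =====
def pvStartsDigit (l : String) : Bool :=
  match PySem.Str.pyGet? l 0 with
  | some c => PySem.Chars.isdigit c
  | none => false  -- unreachable: B only applies this to non-blank lines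

def pvContent (l : String) : String :=
  if pvStartsDigit l then PySem.Str.strip (PySem.Str.slice l (some 1) none)
  else PySem.Str.strip l

-- Source B's while loop: extend the run while the next line does not start with a digit
def pvSpan (run : List String) (rest : List String) : List String × List String :=
  match rest with
  | [] => (run, [])
  | x :: xs => if !pvStartsDigit x then pvSpan (run ++ [x]) xs else (run, x :: xs)

theorem pvSpan_snd_le (run rest : List String) : (pvSpan run rest).2.length ≤ rest.length := by
  induction rest generalizing run with
  | nil => simp [pvSpan]
  | cons x xs ih =>
    simp only [pvSpan]
    split
    · exact le_trans (ih _) (by simp)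
    · simp

def pvRec (ls : List String) : List String :=
  match ls with
  | [] => []
  | l :: rest =>
    let p := pvSpan [l] rest
    PySem.Str.join " " (p.1.map pvContent) :: pvRec p.2
termination_by ls.length
decreasing_by
  have := pvSpan_snd_le [l] rest
  simp only [List.length_cons]
  omega

def format_text_data_alt (input_text : String) : List String :=
  let lines := ((PySem.Str.split? input_text "\n").getD []).filter
    (fun l => PySem.Str.strip l ≠ "")
  pvRec lines

-- ===== PRECONDITION & SPEC =====
def Spec_format_text_data (input_text : String) (out : List String) : Prop := out = format_text_data_alt input_text
instance (input_text : String) (out : List String) : Decidable (Spec_format_text_data input_text out) := by unfold Spec_format_text_data; infer_instance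

-- ===== CLAIM (what is proved, stated in full; the proofs are below) =====
def Claim_equal_format_text_data : Prop := ∀ (input_text : String), Dom_format_text_data input_text → Spec_format_text_data input_text (format_text_data input_text)

-- ===== LEMMAS AND PROOFS =====

-- proof-only helpers
def pvFlush (st : List String × List String) : List String :=
  if st.2 ≠ [] then st.1 ++ [PySem.Str.join " " st.2] else st.1

def pvRecAux (cur : List String) (ls : List String) : List String :=
  match ls with
  | [] => if cur ≠ [] then [PySem.Str.join " " cur] else []
  | l :: rest =>
    if pvStartsDigit l then
      (if cur ≠ [] then [PySem.Str.join " " cur] else []) ++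
        pvRecAux [PySem.Str.strip (PySem.Str.slice l (some 1) none)] rest
    else pvRecAux (cur ++ [PySem.Str.strip l]) rest

theorem pv_strip_nonblank {l : String} (h : PySem.Str.strip l ≠ "") :
    ∃ c cs, l.toList = c :: cs := by
  cases hl : l.toList with
  | nil =>
    exact absurd (by
      have : l = "" := String.toList_eq_nil_iff.mp hl
      subst this; decide) h
  | cons c cs => exact ⟨c, cs, rfl⟩

theorem pvStepA_blank {l : String} (h : ¬ PySem.Str.strip l ≠ "") (st : List String × List String) :
    pvStepA st l = st := by
  simp [pvStepA, h]

theorem pv_foldl_filter (L : List String) (st : List String × List String) :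
    L.foldl pvStepA st = (L.filter (fun l => PySem.Str.strip l ≠ "")).foldl pvStepA st := by
  induction L generalizing st with
  | nil => rfl
  | cons l ls ih =>
    by_cases h : PySem.Str.strip l ≠ ""
    · rw [List.foldl_cons, List.filter_cons, if_pos (by simpa using h), List.foldl_cons]
      exact ih _
    · rw [List.foldl_cons, pvStepA_blank h, List.filter_cons, if_neg (by simpa using h)]
      exact ih _

theorem pv_foldl_recAux (ls : List String) (h : ∀ l ∈ ls, PySem.Str.strip l ≠ "")
    (entries cur : List String) :
    pvFlush (ls.foldl pvStepA (entries, cur)) = entries ++ pvRecAux cur ls := by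
  induction ls generalizing entries cur with
  | nil =>
    simp only [List.foldl_nil, pvFlush, pvRecAux]
    split <;> simp
  | cons l rest ih =>
    have hl : PySem.Str.strip l ≠ "" := h l (by simp)
    obtain ⟨c, cs, hcs⟩ := pv_strip_nonblank hl
    have hrest : ∀ x ∈ rest, PySem.Str.strip x ≠ "" := fun x hx => h x (by simp [hx])
    have hsd : pvStartsDigit l = PySem.Chars.isdigit c := by
      simp [pvStartsDigit, hcs]
    by_cases hd : PySem.Chars.isdigit c
    · have hstep : pvStepA (entries, cur) l =
          ((if cur ≠ [] then entries ++ [PySem.Str.join " " cur] else entries),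
           [PySem.Str.strip (PySem.Str.slice l (some 1) none)]) := by
        simp [pvStepA, hl, hcs, hd]
      rw [List.foldl_cons, hstep, ih hrest]
      simp only [pvRecAux, hsd, hd, if_true]
      by_cases hc : cur = [] <;> simp [hc]
    · have hstep : pvStepA (entries, cur) l = (entries, cur ++ [PySem.Str.strip l]) := by
        simp [pvStepA, hl, hcs, hd]
      rw [List.foldl_cons, hstep, ih hrest]
      simp only [pvRecAux, hsd]
      rw [if_neg (by simpa using hd)]

theorem pvSpan_eq (run rest : List String) :
    pvSpan run rest = (run ++ rest.takeWhile (fun x => !pvStartsDigit x),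
                       rest.dropWhile (fun x => !pvStartsDigit x)) := by
  induction rest generalizing run with
  | nil => simp [pvSpan]
  | cons x xs ih =>
    simp only [pvSpan, List.takeWhile_cons, List.dropWhile_cons]
    by_cases hx : pvStartsDigit x <;> simp [hx, ih]

theorem pvRec_cons (l : String) (rest : List String) :
    pvRec (l :: rest) =
      PySem.Str.join " " ((l :: rest.takeWhile (fun x => !pvStartsDigit x)).map pvContent) ::
        pvRec (rest.dropWhile (fun x => !pvStartsDigit x)) := by
  rw [pvRec]
  simp [pvSpan_eq]

theorem pvRecAux_ne (rest cur : List String) (hc : cur ≠ []) :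
    pvRecAux cur rest =
      PySem.Str.join " " (cur ++ (rest.takeWhile (fun x => !pvStartsDigit x)).map pvContent) ::
        pvRec (rest.dropWhile (fun x => !pvStartsDigit x)) := by
  induction rest generalizing cur with
  | nil => simp [pvRecAux, hc, pvRec]
  | cons l ls ih =>
    by_cases hd : pvStartsDigit l
    · simp only [pvRecAux, hd, if_true, List.takeWhile_cons, List.dropWhile_cons,
        Bool.not_eq_eq_eq_not, Bool.not_true]
      rw [ih _ (by simp)]
      simp [hd, hc, pvRec_cons, pvContent]
    · simp only [pvRecAux, hd, if_false, List.takeWhile_cons, List.dropWhile_cons,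
        Bool.false_eq_true]
      rw [ih _ (by simp)]
      have : pvContent l = PySem.Str.strip l := by simp [pvContent, hd]
      simp [this]

theorem pvRecAux_nil_eq (ls : List String) : pvRecAux [] ls = pvRec ls := by
  cases ls with
  | nil => simp [pvRecAux, pvRec]
  | cons l rest =>
    by_cases hd : pvStartsDigit l
    · simp only [pvRecAux, hd, if_true, ne_eq, not_true_eq_false, if_false,
        List.nil_append]
      rw [pvRecAux_ne _ _ (by simp), pvRec_cons]
      have : pvContent l = PySem.Str.strip (PySem.Str.slice l (some 1) none) := by
        simp [pvContent, hd]
      simp [this]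
    · simp only [pvRecAux, hd, Bool.false_eq_true, if_false, List.nil_append]
      rw [pvRecAux_ne _ _ (by simp), pvRec_cons]
      have : pvContent l = PySem.Str.strip l := by simp [pvContent, hd]
      simp [this]

-- ===== VERDICT (by name: the statement is the Claim_ definition above) =====
theorem format_text_data_spec : Claim_equal_format_text_data := by
  intro input_text _
  unfold Spec_format_text_data format_text_data format_text_data_alt
  simp only []
  rw [pv_foldl_filter]
  have hmem : ∀ l ∈ ((PySem.Str.split? input_text "\n").getD []).filter
      (fun l => PySem.Str.strip l ≠ ""), PySem.Str.strip l ≠ "" := by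
    intro l hl
    simpa using (List.of_mem_filter hl)
  have := pv_foldl_recAux _ hmem [] []
  simp only [pvFlush] at this
  rw [this, List.nil_append, pvRecAux_nil_eq]
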